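-- pv_equiv track=rewrite | github.com/mpereira/interviewing | misc/all_possible_rectangles_from_coordinates.py | rectangles_starting_at
-- ===== SOURCE A (Python) =====
-- from typing import List
--
-- def rectangle_exists(
--     coordinates: List[List[int]],
--     number_of_rows: int,
--     number_of_columns: int,
--     starting_coordinates: List[int],
--     ending_coordinates: List[int],
-- ) -> List[List[int]]:
--     starting_row = starting_coordinates[0]
--     starting_column = starting_coordinates[1]
--     ending_row = ending_coordinates[0]
--     ending_column = ending_coordinates[1]
--     if (
--         coordinates[starting_row][starting_column] == 1
--         and coordinates[ending_row][starting_column] == 1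
--         and coordinates[starting_row][ending_column] == 1
--         and coordinates[ending_row][ending_column] == 1
--     ):
--         return True
--
--     return False
--
-- def rectangles_starting_at(
--     coordinates: List[List[int]],
--     number_of_rows: int,
--     number_of_columns: int,
--     starting_coordinates: List[int],
-- ) -> List[List[int]]:
--     starting_row = starting_coordinates[0]
--     starting_column = starting_coordinates[1]
--     rectangles = []
--     for row in range(starting_row + 1, number_of_rows):
--         for column in range(starting_column + 1, number_of_columns):
--             current_coordinates = [row, column]
--             if rectangle_exists(
--                 coordinates,
--                 number_of_rows,
--                 number_of_columns,
--                 starting_coordinates,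
--                 current_coordinates,
--             ):
--                 rectangles.append([starting_coordinates, current_coordinates])
--     return rectangles
-- ===== SOURCE B (Python) =====
-- from typing import List
--
-- def rectangles_starting_at(
--     coordinates: List[List[int]],
--     number_of_rows: int,
--     number_of_columns: int,
--     starting_coordinates: List[int],
-- ) -> List[List[int]]:
--     starting_row = starting_coordinates[0]
--     starting_column = starting_coordinates[1]
--     if starting_row + 1 >= number_of_rows or starting_column + 1 >= number_of_columns:
--         return []
--     if coordinates[starting_row][starting_column] != 1:
--         return []
--     candidate_rows = [r for r in range(starting_row + 1, number_of_rows)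
--                       if coordinates[r][starting_column] == 1]
--     if not candidate_rows:
--         return []
--     candidate_cols = [c for c in range(starting_column + 1, number_of_columns)
--                       if coordinates[starting_row][c] == 1]
--     return [[starting_coordinates, [r, c]]
--             for r in candidate_rows
--             for c in candidate_cols
--             if coordinates[r][c] == 1]
-- ===== Notes on version B (the rewrite author's own statement) =====
-- stated objective: alternative
-- what changed: Instead of testing all four corners for every (row, column) pair in nested accumulator loops, B returns early when the start corner is 0, precomputes the candidate row and column index lists that share an edge with the start corner, and emits results from a flat comprehension over those candidates checking only the one remaining corner.
import Mathlib
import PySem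

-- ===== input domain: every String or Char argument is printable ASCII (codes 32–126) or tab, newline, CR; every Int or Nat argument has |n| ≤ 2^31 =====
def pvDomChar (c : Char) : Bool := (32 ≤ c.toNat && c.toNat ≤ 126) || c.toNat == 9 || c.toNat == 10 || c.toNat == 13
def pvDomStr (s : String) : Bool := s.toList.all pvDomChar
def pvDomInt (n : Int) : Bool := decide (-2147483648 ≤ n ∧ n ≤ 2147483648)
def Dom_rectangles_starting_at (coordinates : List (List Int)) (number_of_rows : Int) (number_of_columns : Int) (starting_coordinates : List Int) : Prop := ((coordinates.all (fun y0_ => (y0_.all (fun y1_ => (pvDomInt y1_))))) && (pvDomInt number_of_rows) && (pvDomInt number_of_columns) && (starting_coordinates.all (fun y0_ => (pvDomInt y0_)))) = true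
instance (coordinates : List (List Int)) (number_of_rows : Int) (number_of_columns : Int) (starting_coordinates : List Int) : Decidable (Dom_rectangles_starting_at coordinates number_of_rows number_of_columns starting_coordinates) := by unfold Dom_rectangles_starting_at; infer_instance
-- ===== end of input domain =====

-- B is a simpler reformulation: it hoists the start-corner test, precomputes the candidate rows
-- and columns once, and emits pairs checking only the remaining corner (same output, same order).

-- coordinates[i][j]: Python indexing with defaults; Pre_ guarantees every access A performs is in range.
def pvCell (coordinates : List (List Int)) (i j : Int) : Int :=
  PySem.List.pyGetD (PySem.List.pyGetD coordinates i []) j 0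

-- ===== PORT A =====
def rectangle_exists (coordinates : List (List Int)) (number_of_rows : Int) (number_of_columns : Int)
    (starting_coordinates : List Int) (ending_coordinates : List Int) : Bool :=
  let starting_row := PySem.List.pyGetD starting_coordinates 0 0
  let starting_column := PySem.List.pyGetD starting_coordinates 1 0
  let ending_row := PySem.List.pyGetD ending_coordinates 0 0
  let ending_column := PySem.List.pyGetD ending_coordinates 1 0
  if pvCell coordinates starting_row starting_column == 1
      && pvCell coordinates ending_row starting_column == 1
      && pvCell coordinates starting_row ending_column == 1
      && pvCell coordinates ending_row ending_column == 1 then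
    true
  else
    false

def rectangles_starting_at (coordinates : List (List Int)) (number_of_rows : Int) (number_of_columns : Int) (starting_coordinates : List Int) : List (List (List Int)) :=
  let starting_row := PySem.List.pyGetD starting_coordinates 0 0
  let starting_column := PySem.List.pyGetD starting_coordinates 1 0
  (PySem.List.pyRange (starting_row + 1) number_of_rows 1).foldl (fun rectangles row =>
    (PySem.List.pyRange (starting_column + 1) number_of_columns 1).foldl (fun rectangles column =>
      let current_coordinates := [row, column]
      if rectangle_exists coordinates number_of_rows number_of_columns starting_coordinates current_coordinates then
        rectangles ++ [[starting_coordinates, current_coordinates]]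
      else
        rectangles) rectangles) []

-- ===== PORT B =====
def rectangles_starting_at_alt (coordinates : List (List Int)) (number_of_rows : Int) (number_of_columns : Int) (starting_coordinates : List Int) : List (List (List Int)) :=
  let sr := PySem.List.pyGetD starting_coordinates 0 0
  let sc := PySem.List.pyGetD starting_coordinates 1 0
  if number_of_rows ≤ sr + 1 || number_of_columns ≤ sc + 1 then []
  else if pvCell coordinates sr sc != 1 then []
  else
    let candidateRows := (PySem.List.pyRange (sr + 1) number_of_rows 1).filter
      (fun r => pvCell coordinates r sc == 1)
    if candidateRows.isEmpty then []
    else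
      let candidateCols := (PySem.List.pyRange (sc + 1) number_of_columns 1).filter
        (fun c => pvCell coordinates sr c == 1)
      candidateRows.flatMap (fun r =>
        (candidateCols.filter (fun c => pvCell coordinates r c == 1)).map
          (fun c => [starting_coordinates, [r, c]]))

-- ===== PRECONDITION & SPEC =====
-- Pre_ is exactly the inputs where Python A returns (no IndexError): starting_coordinates has
-- two entries, and each grid access A's short-circuiting evaluation actually performs is in range.
def Pre_rectangles_starting_at (coordinates : List (List Int)) (number_of_rows : Int) (number_of_columns : Int) (starting_coordinates : List Int) : Prop :=
  2 ≤ starting_coordinates.length ∧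
  (let sr := PySem.List.pyGetD starting_coordinates 0 0
   let sc := PySem.List.pyGetD starting_coordinates 1 0
   sr + 1 < number_of_rows → sc + 1 < number_of_columns →
     PySem.Raise.InRange coordinates.length sr ∧
     PySem.Raise.InRange (PySem.List.pyGetD coordinates sr []).length sc ∧
     (pvCell coordinates sr sc = 1 →
       ∀ r ∈ PySem.List.pyRange (sr + 1) number_of_rows 1,
         PySem.Raise.InRange coordinates.length r ∧
         PySem.Raise.InRange (PySem.List.pyGetD coordinates r []).length sc ∧
         (pvCell coordinates r sc = 1 →
           ∀ c ∈ PySem.List.pyRange (sc + 1) number_of_columns 1,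
             PySem.Raise.InRange (PySem.List.pyGetD coordinates sr []).length c ∧
             (pvCell coordinates sr c = 1 →
               PySem.Raise.InRange (PySem.List.pyGetD coordinates r []).length c))))
instance (coordinates : List (List Int)) (number_of_rows : Int) (number_of_columns : Int) (starting_coordinates : List Int) : Decidable (Pre_rectangles_starting_at coordinates number_of_rows number_of_columns starting_coordinates) := by unfold Pre_rectangles_starting_at; infer_instance

def pvWitness_rectangles_starting_at : List (List Int) × Int × Int × List Int :=
  ([[1, 1, 0], [1, 0, 1], [1, 1, 1]], 3, 3, [0, 0])

def Spec_rectangles_starting_at (coordinates : List (List Int)) (number_of_rows : Int) (number_of_columns : Int) (starting_coordinates : List Int) (out : List (List (List Int))) : Prop := out = rectangles_starting_at_alt coordinates number_of_rows number_of_columns starting_coordinates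
instance (coordinates : List (List Int)) (number_of_rows : Int) (number_of_columns : Int) (starting_coordinates : List Int) (out : List (List (List Int))) : Decidable (Spec_rectangles_starting_at coordinates number_of_rows number_of_columns starting_coordinates out) := by unfold Spec_rectangles_starting_at; infer_instance

-- ===== CLAIM (what is proved, stated in full; the proofs are below) =====
def Claim_equal_rectangles_starting_at : Prop := ∀ (coordinates : List (List Int)) (number_of_rows : Int) (number_of_columns : Int) (starting_coordinates : List Int), Dom_rectangles_starting_at coordinates number_of_rows number_of_columns starting_coordinates → Pre_rectangles_starting_at coordinates number_of_rows number_of_columns starting_coordinates → Spec_rectangles_starting_at coordinates number_of_rows number_of_columns starting_coordinates (rectangles_starting_at coordinates number_of_rows number_of_columns starting_coordinates)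

-- ===== LEMMAS AND PROOFS =====

-- rows r with p r = false contribute [] to the flatMap, so they can be filtered away
theorem pvFlatMap_filter_of_nil {α β : Type} (R : List α) (p : α → Bool) (G : α → List β)
    (h : ∀ r ∈ R, p r = false → G r = []) : R.flatMap G = (R.filter p).flatMap G := by
  induction R with
  | nil => rfl
  | cons a R ih =>
    have ih' := ih (fun r hr => h r (List.mem_cons_of_mem a hr))
    rcases hp : p a with _ | _
    · rw [List.filter_cons_of_neg (by simp [hp]), List.flatMap_cons,
        h a List.mem_cons_self hp, List.nil_append, ih']
    · rw [List.filter_cons_of_pos (by simp [hp]), List.flatMap_cons, List.flatMap_cons, ih']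

theorem pvFlatMap_congr_mem {α β : Type} (l : List α) (f g : α → List β)
    (h : ∀ a ∈ l, f a = g a) : l.flatMap f = l.flatMap g := by
  induction l with
  | nil => rfl
  | cons a l ih =>
    simp only [List.flatMap_cons, h a List.mem_cons_self,
      ih (fun x hx => h x (List.mem_cons_of_mem a hx))]

-- the two ports agree on every input (they are even total on the defaulted accessors)
theorem pvPortsAgree (coordinates : List (List Int)) (number_of_rows : Int) (number_of_columns : Int) (starting_coordinates : List Int) :
    rectangles_starting_at coordinates number_of_rows number_of_columns starting_coordinates =
    rectangles_starting_at_alt coordinates number_of_rows number_of_columns starting_coordinates := by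
  unfold rectangles_starting_at rectangles_starting_at_alt rectangle_exists
  set sr := PySem.List.pyGetD starting_coordinates 0 0 with hsr
  set sc := PySem.List.pyGetD starting_coordinates 1 0 with hsc
  have hb : ∀ (b : Bool), (if b = true then true else false) = b := fun b => by cases b <;> rfl
  have h0 : ∀ (a b : Int), PySem.List.pyGetD [a, b] 0 0 = a := fun a b => rfl
  have h1 : ∀ (a b : Int), PySem.List.pyGetD [a, b] 1 0 = b := fun a b => rfl
  simp only [hb, h0, h1]
  -- collapse A's nested loop into a flatMap of filtered maps
  have hA : ∀ (R : List Int),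
      R.foldl (fun rectangles row =>
        (PySem.List.pyRange (sc + 1) number_of_columns 1).foldl (fun rectangles column =>
          if (pvCell coordinates sr sc == 1 && pvCell coordinates row sc == 1 &&
              pvCell coordinates sr column == 1 && pvCell coordinates row column == 1) then
            rectangles ++ [[starting_coordinates, [row, column]]]
          else rectangles) rectangles) ([] : List (List (List Int))) =
      R.flatMap (fun row =>
        ((PySem.List.pyRange (sc + 1) number_of_columns 1).filter (fun column =>
          pvCell coordinates sr sc == 1 && pvCell coordinates row sc == 1 &&
          pvCell coordinates sr column == 1 && pvCell coordinates row column == 1)).map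
          (fun column => [starting_coordinates, [row, column]])) := by
    intro R
    rw [show (fun (rectangles : List (List (List Int))) row =>
        (PySem.List.pyRange (sc + 1) number_of_columns 1).foldl (fun rectangles column =>
          if (pvCell coordinates sr sc == 1 && pvCell coordinates row sc == 1 &&
              pvCell coordinates sr column == 1 && pvCell coordinates row column == 1) then
            rectangles ++ [[starting_coordinates, [row, column]]]
          else rectangles) rectangles) =
        (fun rectangles row => rectangles ++
          ((PySem.List.pyRange (sc + 1) number_of_columns 1).filter (fun column =>
            pvCell coordinates sr sc == 1 && pvCell coordinates row sc == 1 &&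
            pvCell coordinates sr column == 1 && pvCell coordinates row column == 1)).map
            (fun column => [starting_coordinates, [row, column]])) from by
      funext rectangles row
      exact PySem.List.foldl_append_if _ _ _ _]
    rw [PySem.List.foldl_append_eq_flatMap]
    rfl
  rw [hA]
  by_cases hr : number_of_rows ≤ sr + 1
  · simp [PySem.List.pyRange_one_eq_nil hr, hr]
  · by_cases hc : number_of_columns ≤ sc + 1
    · simp [PySem.List.pyRange_one_eq_nil hc, hc]
    · simp only [if_neg (by simp [hr, hc] : ¬(decide (number_of_rows ≤ sr + 1) ||
        decide (number_of_columns ≤ sc + 1)) = true)]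
      by_cases hstart : pvCell coordinates sr sc = 1
      · simp only [hstart, bne_self_eq_false, Bool.false_eq_true, if_false, beq_self_eq_true,
          Bool.true_and]
        rw [pvFlatMap_filter_of_nil (PySem.List.pyRange (sr + 1) number_of_rows 1)
          (fun r => pvCell coordinates r sc == 1) _
          (by intro r _ hpr; simp [hpr])]
        by_cases hempty : ((PySem.List.pyRange (sr + 1) number_of_rows 1).filter
            (fun r => pvCell coordinates r sc == 1)).isEmpty
        · simp [List.isEmpty_iff.mp hempty]
        · rw [if_neg hempty]
          apply pvFlatMap_congr_mem
          intro r hrmem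
          have hpr : (pvCell coordinates r sc == 1) = true :=
            (List.mem_filter.mp hrmem).2
          rw [List.filter_filter]
          apply congrArg
          apply List.filter_congr
          intro c _
          simp [hpr, Bool.and_comm]
      · have : (pvCell coordinates sr sc == 1) = false := by simp [hstart]
        simp [this, hstart]

-- ===== VERDICT (by name: the statement is the Claim_ definition above) =====
theorem rectangles_starting_at_spec : Claim_equal_rectangles_starting_at := by
  intro coordinates number_of_rows number_of_columns starting_coordinates _ _
  exact pvPortsAgree coordinates number_of_rows number_of_columns starting_coordinates
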